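-- pv_equiv track=rewrite | github.com/mrdannyclark82/3d-object-generation | services/agent_service.py | _parse_objects_from_response
-- ===== SOURCE A (Python) =====
-- def _parse_objects_from_response(response_text):
--     """Parse object names from the agent's response."""
--     objects = []
--     lines = response_text.split('\n')
--
--     for line in lines:
--         line = line.strip()
--         if line and (line.startswith(('1.', '2.', '3.', '4.', '5.', '6.', '7.', '8.', '9.', '10.',
--                                     '11.', '12.', '13.', '14.', '15.', '16.', '17.', '18.', '19.', '20.'))):
--             # Extract object name after the number
--             object_name = line.split('.', 1)[1].strip()
--             if object_name:
--                 objects.append(object_name)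
--
--     return objects
-- ===== SOURCE B (Python) =====
-- def _scan_number(s):
--     """Consume the leading digit run of s, returning (its decimal value, the remainder)."""
--     val = 0
--     while s and s[0].isdigit():
--         val = val * 10 + (ord(s[0]) - 48)
--         s = s[1:]
--     return val, s
--
--
-- def _name_of_line(line):
--     """Return the object name carried by a 'N. name' line (N = 1..20, no leading zero), else None."""
--     s = line.strip()
--     if not s or not s[0].isdigit() or s[0] == '0':
--         return None
--     val, rest = _scan_number(s)
--     if val > 20 or not rest or rest[0] != '.':
--         return None
--     name = rest[1:].strip()
--     return name if name else None
--
--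
-- def _parse_objects_from_response(response_text):
--     return [name for name in map(_name_of_line, response_text.split('\n')) if name is not None]
-- ===== Notes on version B (the rewrite author's own statement) =====
-- stated objective: alternative
-- what changed: Replaces the 20-element startswith-tuple test plus the dot-split re-scan of each line by a single left-to-right numeric scan that consumes the leading digit run, computes its value, and accepts exactly values 1 to 20 without a leading zero, with the per-line work factored into an Optional-returning helper consumed by one comprehension.
import Mathlib
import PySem

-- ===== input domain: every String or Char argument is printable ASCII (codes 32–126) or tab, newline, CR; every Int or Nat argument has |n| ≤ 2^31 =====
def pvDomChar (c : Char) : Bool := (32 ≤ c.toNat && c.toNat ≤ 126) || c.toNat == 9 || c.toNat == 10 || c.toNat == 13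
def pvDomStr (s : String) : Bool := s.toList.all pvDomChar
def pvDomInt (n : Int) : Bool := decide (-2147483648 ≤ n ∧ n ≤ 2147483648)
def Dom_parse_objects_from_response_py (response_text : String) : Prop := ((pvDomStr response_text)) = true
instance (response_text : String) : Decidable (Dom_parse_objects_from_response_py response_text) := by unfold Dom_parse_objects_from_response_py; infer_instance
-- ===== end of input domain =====

-- B replaces A's 20-element startswith tuple plus split('.',1) by a single numeric scan of the
-- line's leading digit run (value 1..20, no leading zero); objective: alternative (same cost).

-- ===== PORT A =====
-- the tuple of prefixes '1.' .. '20.'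
def pvPrefixes : List (List Char) :=
  [['1','.'],['2','.'],['3','.'],['4','.'],['5','.'],['6','.'],['7','.'],['8','.'],['9','.'],
   ['1','0','.'],['1','1','.'],['1','2','.'],['1','3','.'],['1','4','.'],['1','5','.'],
   ['1','6','.'],['1','7','.'],['1','8','.'],['1','9','.'],['2','0','.']]

def parse_objects_from_response_py (response_text : String) : List String :=
  let lines := PySem.Chars.splitOn response_text.toList ['\n']
  (lines.foldl (fun objects line =>
      let line := PySem.Chars.strip line
      if line ≠ [] ∧ pvPrefixes.any (fun p => PySem.Chars.startswith line p) then
        -- object_name = line.split('.', 1)[1].strip()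
        match PySem.List.pyGet? (PySem.Chars.splitOnMax line ['.'] 1) 1 with
        | some rest =>
            let object_name := PySem.Chars.strip rest
            if object_name ≠ [] then objects ++ [object_name] else objects
        | none => objects  -- unreachable: the startswith guard guarantees a '.' in line
      else objects) []).map String.ofList

-- ===== PORT B =====
-- while s and s[0].isdigit(): val = val*10 + (ord(s[0]) - 48); s = s[1:]
def pvScan : List Char → Nat → Nat × List Char
  | [], val => (val, [])
  | c :: t, val =>
      if PySem.Chars.isdigit c then pvScan t (val * 10 + (c.toNat - 48)) else (val, c :: t)

def pvNameOf (line : List Char) : Option (List Char) :=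
  match PySem.Chars.strip line with
  | [] => none
  | c0 :: t0 =>
    if ¬ PySem.Chars.isdigit c0 ∨ c0 = '0' then none
    else
      match pvScan (c0 :: t0) 0 with
      | (val, rest) =>
        match rest with
        | [] => none
        | r0 :: tail =>
          if val > 20 ∨ ¬ r0 = '.' then none
          else
            let name := PySem.Chars.strip tail
            if name = [] then none else some name

def parse_objects_from_response_py_alt (response_text : String) : List String :=
  ((PySem.Chars.splitOn response_text.toList ['\n']).filterMap pvNameOf).map String.ofList

-- ===== PRECONDITION & SPEC =====
def Spec_parse_objects_from_response_py (response_text : String) (out : List String) : Prop := out = parse_objects_from_response_py_alt response_text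
instance (response_text : String) (out : List String) : Decidable (Spec_parse_objects_from_response_py response_text out) := by unfold Spec_parse_objects_from_response_py; infer_instance

-- ===== CLAIM (what is proved, stated in full; the proofs are below) =====
def Claim_equal_parse_objects_from_response_py : Prop := ∀ (response_text : String), Dom_parse_objects_from_response_py response_text → Spec_parse_objects_from_response_py response_text (parse_objects_from_response_py response_text)

-- ===== LEMMAS AND PROOFS =====

lemma pv_char_ofNat {c : Char} {n : Nat} (h : c.toNat = n) : c = Char.ofNat n := by
  rw [← h, Char.ofNat_toNat]

lemma pv_isdigit_iff (c : Char) : PySem.Chars.isdigit c = true ↔ 48 ≤ c.toNat ∧ c.toNat ≤ 57 := by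
  simp [PySem.Chars.isdigit, Char.le_def, UInt32.le_iff_toNat_le]

lemma pv_toNat_ne {c d : Char} (h : ¬ c = d) : ¬ c.toNat = d.toNat := by
  intro he; exact h (by rw [pv_char_ofNat he, Char.ofNat_toNat])

lemma pv_digit_ne_dot {c : Char} (h : PySem.Chars.isdigit c = true) : ¬ (('.' : Char) = c) := by
  rw [pv_isdigit_iff] at h; intro he; rw [← he] at h; simp at h

lemma pv_digit_ne0_iff {c : Char} (h : PySem.Chars.isdigit c = true) :
    (¬ c = '0') ↔ (c='1'∨c='2'∨c='3'∨c='4'∨c='5'∨c='6'∨c='7'∨c='8'∨c='9') := by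
  rw [pv_isdigit_iff] at h
  constructor
  · intro h0
    have h48 := pv_toNat_ne h0
    have h0' : ('0':Char).toNat = 48 := rfl
    have : c.toNat = 49 ∨ c.toNat = 50 ∨ c.toNat = 51 ∨ c.toNat = 52 ∨ c.toNat = 53 ∨
        c.toNat = 54 ∨ c.toNat = 55 ∨ c.toNat = 56 ∨ c.toNat = 57 := by
      simp only [Char.toNat] at *; omega
    rcases this with h|h|h|h|h|h|h|h|h <;> rw [pv_char_ofNat h] <;> decide
  · rintro (h|h|h|h|h|h|h|h|h) <;> subst h <;> decide

lemma pv_splitOnMax_go_zero (sep : List Char) (fuel : Nat) (l cur : List Char) (acc : List (List Char)) :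
    PySem.Chars.splitOnMax.go sep fuel 0 l cur acc = ((cur.reverse ++ l) :: acc).reverse := by
  cases fuel with
  | zero => simp [PySem.Chars.splitOnMax.go]
  | succ f => cases l with
    | nil => simp [PySem.Chars.splitOnMax.go]
    | cons c t => simp [PySem.Chars.splitOnMax.go]

lemma pv_splitOnMax_dot_one (c : Char) (hc : ¬ (('.':Char) = c)) (t : List Char) :
    PySem.Chars.splitOnMax (c :: '.' :: t) ['.'] 1 = [[c], t] := by
  simp [PySem.Chars.splitOnMax, PySem.Chars.splitOnMax.go, hc, pv_splitOnMax_go_zero]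

lemma pv_splitOnMax_dot_two (c c2 : Char) (hc : ¬ (('.':Char) = c)) (hc2 : ¬ (('.':Char) = c2)) (t : List Char) :
    PySem.Chars.splitOnMax (c :: c2 :: '.' :: t) ['.'] 1 = [[c, c2], t] := by
  simp [PySem.Chars.splitOnMax, PySem.Chars.splitOnMax.go, hc, hc2, pv_splitOnMax_go_zero]

lemma pv_scan_fst_ge : ∀ (t : List Char) (v : Nat), v ≤ (pvScan t v).1 := by
  intro t
  induction t with
  | nil => intro v; simp [pvScan]
  | cons c t ih =>
    intro v
    by_cases hd : PySem.Chars.isdigit c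
    · simp only [pvScan, hd, if_pos]
      exact le_trans (by omega) (ih (v * 10 + (c.toNat - 48)))
    · simp [pvScan, hd]

-- per-line forms of the two loop bodies, written as Option-producing functions
def pvCoreA (s : List Char) : Option (List Char) :=
  if s ≠ [] ∧ pvPrefixes.any (fun p => PySem.Chars.startswith s p) then
    match PySem.List.pyGet? (PySem.Chars.splitOnMax s ['.'] 1) 1 with
    | some rest =>
        if PySem.Chars.strip rest ≠ [] then some (PySem.Chars.strip rest) else none
    | none => none
  else none

def pvCoreB (s : List Char) : Option (List Char) :=
  match s with
  | [] => none
  | c0 :: t0 =>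
    if ¬ PySem.Chars.isdigit c0 ∨ c0 = '0' then none
    else
      match pvScan (c0 :: t0) 0 with
      | (val, rest) =>
        match rest with
        | [] => none
        | r0 :: tail =>
          if val > 20 ∨ ¬ r0 = '.' then none
          else if PySem.Chars.strip tail = [] then none else some (PySem.Chars.strip tail)

lemma pv_nameOf_eq (l : List Char) : pvNameOf l = pvCoreB (PySem.Chars.strip l) := by
  unfold pvNameOf pvCoreB
  rfl

lemma pv_digit_disj {c : Char} (h : PySem.Chars.isdigit c = true) :
    c='0'∨c='1'∨c='2'∨c='3'∨c='4'∨c='5'∨c='6'∨c='7'∨c='8'∨c='9' := by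
  by_cases h0 : c = '0'
  · exact Or.inl h0
  · exact Or.inr ((pv_digit_ne0_iff h).mp h0)

-- the per-line meat: A's guarded startswith/split pipeline equals B's numeric scan
set_option maxHeartbeats 2000000 in
lemma pv_core_eq (s : List Char) : pvCoreA s = pvCoreB s := by
  unfold pvCoreA pvCoreB
  cases s with
  | nil => simp
  | cons c t =>
    by_cases hd : PySem.Chars.isdigit c = true
    · by_cases h0 : c = '0'
      · subst h0
        simp [pvPrefixes, PySem.Chars.startswith, List.isPrefixOf]
      · rcases (pv_digit_ne0_iff hd).mp h0 with hc|hc|hc|hc|hc|hc|hc|hc|hc <;> subst hc <;>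
        · cases t with
          | nil => simp [pvPrefixes, PySem.Chars.startswith, List.isPrefixOf, pvScan,
              PySem.Chars.isdigit]
          | cons c2 t2 =>
            by_cases hd2 : PySem.Chars.isdigit c2 = true
            · rcases pv_digit_disj hd2 with hc2|hc2|hc2|hc2|hc2|hc2|hc2|hc2|hc2|hc2 <;> subst hc2 <;>
              · cases t2 with
                | nil => simp [pvPrefixes, PySem.Chars.startswith, List.isPrefixOf, pvScan,
                    PySem.Chars.isdigit]
                | cons c3 t3 =>
                  by_cases hdot3 : c3 = '.'
                  · subst hdot3
                    rw [pv_splitOnMax_dot_two _ _ (by decide) (by decide)]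
                    by_cases ht : PySem.Chars.strip t3 = [] <;>
                      simp [pvPrefixes, PySem.Chars.startswith, List.isPrefixOf, pvScan,
                        PySem.List.pyGet?, PySem.List.pyIdx?, ht, PySem.Chars.isdigit]
                  · by_cases hd3 : PySem.Chars.isdigit c3 = true
                    · have hdd : ¬(('.':Char) = c3) := pv_digit_ne_dot hd3
                      have hb := (pv_isdigit_iff c3).mp hd3
                      have hp : ('0':Char) ≤ c3 ∧ c3 ≤ '9' := by
                        simpa [PySem.Chars.isdigit] using hd3
                      simp [pvPrefixes, PySem.Chars.startswith, List.isPrefixOf, pvScan,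
                        PySem.Chars.isdigit, hdd, hd3, hp]
                      split
                      · rfl
                      · rw [if_pos (Or.inl (lt_of_lt_of_le (by omega) (pv_scan_fst_ge _ _)))]
                    · have hdf : ¬(('.':Char) = c3) := fun h => hdot3 h.symm
                      have hp : ¬(('0':Char) ≤ c3 ∧ c3 ≤ '9') := by
                        simpa [PySem.Chars.isdigit] using hd3
                      simp [pvPrefixes, PySem.Chars.startswith, List.isPrefixOf, pvScan,
                        PySem.Chars.isdigit, hd3, hdf, hdot3, hp]
            · by_cases hdot : c2 = '.'
              · subst hdot
                rw [pv_splitOnMax_dot_one _ (by decide)]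
                by_cases ht : PySem.Chars.strip t2 = [] <;>
                  simp [pvPrefixes, PySem.Chars.startswith, List.isPrefixOf, pvScan,
                    PySem.List.pyGet?, PySem.List.pyIdx?, ht, hd2,
                    PySem.Chars.isdigit]
              · have hdotf : ¬ (('.':Char) = c2) := fun h => hdot h.symm
                have e0 : ¬(('0':Char) = c2) := fun h => hd2 (by rw [← h]; decide)
                have e1 : ¬(('1':Char) = c2) := fun h => hd2 (by rw [← h]; decide)
                have e2 : ¬(('2':Char) = c2) := fun h => hd2 (by rw [← h]; decide)
                have e3 : ¬(('3':Char) = c2) := fun h => hd2 (by rw [← h]; decide)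
                have e4 : ¬(('4':Char) = c2) := fun h => hd2 (by rw [← h]; decide)
                have e5 : ¬(('5':Char) = c2) := fun h => hd2 (by rw [← h]; decide)
                have e6 : ¬(('6':Char) = c2) := fun h => hd2 (by rw [← h]; decide)
                have e7 : ¬(('7':Char) = c2) := fun h => hd2 (by rw [← h]; decide)
                have e8 : ¬(('8':Char) = c2) := fun h => hd2 (by rw [← h]; decide)
                have e9 : ¬(('9':Char) = c2) := fun h => hd2 (by rw [← h]; decide)
                have hR : ¬(('0':Char) ≤ c2 ∧ c2 ≤ '9') := fun h => hd2 (by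
                  simp [PySem.Chars.isdigit]; exact h)
                simp [pvPrefixes, PySem.Chars.startswith, List.isPrefixOf, pvScan,
                  hdotf, hdot, PySem.Chars.isdigit, e0,e1,e2,e3,e4,e5,e6,e7,e8,e9, hR]
    ·
      have f0 : ¬(('0':Char) = c) := fun h => hd (by rw [← h]; decide)
      have f1 : ¬(('1':Char) = c) := fun h => hd (by rw [← h]; decide)
      have f2 : ¬(('2':Char) = c) := fun h => hd (by rw [← h]; decide)
      have f3 : ¬(('3':Char) = c) := fun h => hd (by rw [← h]; decide)
      have f4 : ¬(('4':Char) = c) := fun h => hd (by rw [← h]; decide)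
      have f5 : ¬(('5':Char) = c) := fun h => hd (by rw [← h]; decide)
      have f6 : ¬(('6':Char) = c) := fun h => hd (by rw [← h]; decide)
      have f7 : ¬(('7':Char) = c) := fun h => hd (by rw [← h]; decide)
      have f8 : ¬(('8':Char) = c) := fun h => hd (by rw [← h]; decide)
      have f9 : ¬(('9':Char) = c) := fun h => hd (by rw [← h]; decide)
      simp [pvPrefixes, PySem.Chars.startswith, List.isPrefixOf, hd,
        f0,f1,f2,f3,f4,f5,f6,f7,f8,f9]

-- A's foldl-with-append equals filterMap of the per-line function
lemma pv_foldl_filterMap (g : List Char → Option (List Char))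
    (body : List (List Char) → List Char → List (List Char))
    (hb : ∀ acc x, body acc x = acc ++ (g x).toList) :
    ∀ (xs : List (List Char)) (acc : List (List Char)),
      xs.foldl body acc = acc ++ xs.filterMap g := by
  intro xs
  induction xs with
  | nil => intro acc; simp
  | cons x xs ih =>
    intro acc
    simp only [List.foldl_cons, hb, List.filterMap_cons]
    cases hx : g x with
    | none => simpa using ih acc
    | some n => simp [ih, Option.toList]

lemma pv_body_eq (acc : List (List Char)) (l : List Char) :
    (let line := PySem.Chars.strip l
     if line ≠ [] ∧ pvPrefixes.any (fun p => PySem.Chars.startswith line p) then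
        match PySem.List.pyGet? (PySem.Chars.splitOnMax line ['.'] 1) 1 with
        | some rest =>
            let object_name := PySem.Chars.strip rest
            if object_name ≠ [] then acc ++ [object_name] else acc
        | none => acc
      else acc)
    = acc ++ (pvNameOf l).toList := by
  rw [pv_nameOf_eq, ← pv_core_eq]
  unfold pvCoreA
  by_cases hg : PySem.Chars.strip l ≠ [] ∧
      (pvPrefixes.any fun p => PySem.Chars.startswith (PySem.Chars.strip l) p) = true
  · rw [if_pos hg, if_pos hg]
    cases hx : PySem.List.pyGet? (PySem.Chars.splitOnMax (PySem.Chars.strip l) ['.'] 1) 1 with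
    | none => simp
    | some rest =>
      dsimp only
      by_cases hn : PySem.Chars.strip rest ≠ []
      · rw [if_pos hn, if_pos hn]; simp
      · rw [if_neg hn, if_neg hn]; simp
  · rw [if_neg hg, if_neg hg]; simp

-- ===== VERDICT (by name: the statement is the Claim_ definition above) =====
theorem parse_objects_from_response_py_spec : Claim_equal_parse_objects_from_response_py := by
  intro response_text _
  unfold Spec_parse_objects_from_response_py
  simp only [parse_objects_from_response_py, parse_objects_from_response_py_alt]
  rw [pv_foldl_filterMap pvNameOf _ pv_body_eq]
  simp
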